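-- pv_equiv track=rewrite | github.com/Oleg-algebra/CTF_Practice | Crypto/Advanced_Crypto_v2.py | select_symbols
-- ===== SOURCE A (Python) =====
-- def select_symbols(lst_blocks,ln):
--     l=ln
--
--     lst_char=[]
--
--     for k in range(l):
--         n_char = ''
--         for block in lst_blocks:
--             try:
--                 n_char+=block[k]
--             except IndexError:
--                 break
--         lst_char.append(n_char)
--
--     return lst_char
-- ===== SOURCE B (Python) =====
-- def select_symbols(lst_blocks, ln):
--     cols = ['' for _ in range(ln)]
--     pm = ln  # running prefix-minimum of block lengths, capped at ln
--     for block in lst_blocks: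
--         if len(block) < pm:
--             pm = len(block)
--         for k in range(pm):
--             cols[k] += block[k]
--     return cols
-- ===== Notes on version B (the rewrite author's own statement) =====
-- stated objective: alternative
-- what changed: Column-major scan with a per-column break on the first short block is replaced by a single block-major pass that maintains a running prefix-minimum of block lengths and appends each block's first pm characters to pre-allocated columns.
import Mathlib
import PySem

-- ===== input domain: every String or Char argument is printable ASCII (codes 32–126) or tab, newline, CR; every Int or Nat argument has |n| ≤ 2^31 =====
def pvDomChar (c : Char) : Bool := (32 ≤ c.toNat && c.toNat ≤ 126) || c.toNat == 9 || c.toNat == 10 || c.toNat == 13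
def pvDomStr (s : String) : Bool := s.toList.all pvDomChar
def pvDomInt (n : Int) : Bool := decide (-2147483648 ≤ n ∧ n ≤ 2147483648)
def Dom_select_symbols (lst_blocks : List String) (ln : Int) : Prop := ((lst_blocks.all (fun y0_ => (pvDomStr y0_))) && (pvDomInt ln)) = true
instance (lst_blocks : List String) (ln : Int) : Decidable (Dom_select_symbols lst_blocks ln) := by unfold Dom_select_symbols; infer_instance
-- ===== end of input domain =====

-- B replaces A's column-major loop (per-column break at the first too-short block) by a single
-- block-major pass maintaining a running prefix-minimum of block lengths ("alternative" objective).

-- ===== PORT A =====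
-- inner loop: 'for block in lst_blocks: try: n_char += block[k] except IndexError: break'
def selColA (blocks : List String) (k : Int) : List Char :=
  match blocks with
  | [] => []
  | b :: bs =>
    match PySem.Str.pyGet? b k with
    | some c => c :: selColA bs k
    | none => []

def select_symbols (lst_blocks : List String) (ln : Int) : List String :=
  (PySem.List.pyRange 0 ln 1).foldl
    (fun acc k => acc ++ [String.ofList (selColA lst_blocks k)]) []

-- ===== PORT B =====
-- inner loop: 'for k in range(pm): cols[k] += block[k]'
def updCols (cols : List (List Char)) (b : List Char) (pm : Int) : List (List Char) :=
  (PySem.List.pyRange 0 pm 1).foldl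
    (fun cs k => cs.set k.toNat (cs.getD k.toNat [] ++ [PySem.List.pyGetD b k ' '])) cols

-- outer loop: 'for block in lst_blocks: pm = min(pm, len(block)); <inner loop>'
def bLoop (blocks : List (List Char)) (cols : List (List Char)) (pm : Int) : List (List Char) :=
  match blocks with
  | [] => cols
  | b :: bs =>
    let pm' := min pm (b.length : Int)
    bLoop bs (updCols cols b pm') pm'

def select_symbols_alt (lst_blocks : List String) (ln : Int) : List String :=
  (bLoop (lst_blocks.map String.toList) (List.replicate ln.toNat []) ln).map String.ofList

-- ===== PRECONDITION & SPEC =====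
def Spec_select_symbols (lst_blocks : List String) (ln : Int) (out : List String) : Prop := out = select_symbols_alt lst_blocks ln
instance (lst_blocks : List String) (ln : Int) (out : List String) : Decidable (Spec_select_symbols lst_blocks ln out) := by unfold Spec_select_symbols; infer_instance

-- ===== CLAIM (what is proved, stated in full; the proofs are below) =====
def Claim_equal_select_symbols : Prop := ∀ (lst_blocks : List String) (ln : Int), Dom_select_symbols lst_blocks ln → Spec_select_symbols lst_blocks ln (select_symbols lst_blocks ln)

-- ===== LEMMAS AND PROOFS =====

-- char-list version of A's column builder, to reason on the list side
def selColC (blocks : List (List Char)) (k : Int) : List Char :=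
  match blocks with
  | [] => []
  | b :: bs =>
    match PySem.List.pyGet? b k with
    | some c => c :: selColC bs k
    | none => []

theorem selColA_eq_selColC (blocks : List String) (k : Int) :
    selColA blocks k = selColC (blocks.map String.toList) k := by
  induction blocks with
  | nil => rfl
  | cons b bs ih =>
    simp only [selColA, selColC, List.map]
    have hb : PySem.Str.pyGet? b k = PySem.List.pyGet? b.toList k := by
      simp [PySem.Str.pyGet?]
    rw [hb]
    cases PySem.List.pyGet? b.toList k <;> simp [ih]

theorem length_updCols (cols : List (List Char)) (b : List Char) (pm : Int) :
    (updCols cols b pm).length = cols.length := by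
  unfold updCols
  generalize PySem.List.pyRange 0 pm 1 = l
  induction l generalizing cols with
  | nil => rfl
  | cons x xs ih =>
    rw [List.foldl_cons, ih, List.length_set]

theorem getElem_updCols (cols : List (List Char)) (b : List Char) (m : Nat) :
    ∀ (_ : m ≤ cols.length) (i : Nat) (hi : i < cols.length),
    (updCols cols b (m : Int))[i]'(by rw [length_updCols]; exact hi) =
      if i < m then cols[i] ++ [PySem.List.pyGetD b (i : Int) ' '] else cols[i] := by
  induction m with
  | zero =>
    intro h1 i hi
    simp [updCols]
  | succ m ih =>
    intro h1 i hi
    have hm : m ≤ cols.length := by omega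
    have hmlt : m < (updCols cols b (m : Int)).length := by
      rw [length_updCols]; omega
    have hr : PySem.List.pyRange 0 ((m + 1 : Nat) : Int) 1
        = PySem.List.pyRange 0 (m : Int) 1 ++ [(m : Int)] := by
      have hc : ((m + 1 : Nat) : Int) = (m : Int) + 1 := by push_cast; ring
      rw [hc, PySem.List.pyRange_one_succ_right (by exact_mod_cast Int.natCast_nonneg m)]
    have step : updCols cols b ((m + 1 : Nat) : Int)
        = (updCols cols b (m : Int)).set m
            ((updCols cols b (m : Int)).getD m [] ++ [PySem.List.pyGetD b (m : Int) ' ']) := by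
      unfold updCols
      rw [hr, List.foldl_append]
      simp
    have hU : (updCols cols b (m : Int)).getD m [] = cols[m]'(by omega) := by
      have h2 := ih hm m (by omega)
      simp [List.getD_eq_getElem?_getD, List.getElem?_eq_getElem hmlt, h2]
    simp only [step]
    by_cases him : i = m
    · subst him
      rw [List.getElem_set, if_pos rfl, hU, if_pos (Nat.lt_succ_self i)]
    · rw [List.getElem_set]
      rw [if_neg (by omega : ¬ m = i)]
      rw [ih hm i hi]
      by_cases hlt : i < m
      · rw [if_pos hlt, if_pos (by omega)]
      · rw [if_neg hlt, if_neg (by omega)]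

theorem length_bLoop (blocks cols : List (List Char)) (pm : Int) :
    (bLoop blocks cols pm).length = cols.length := by
  induction blocks generalizing cols pm with
  | nil => rfl
  | cons b bs ih => simp [bLoop, ih, length_updCols]

theorem getElem_bLoop (blocks : List (List Char)) :
    ∀ (cols : List (List Char)) (pm : Int), 0 ≤ pm → pm ≤ (cols.length : Int) →
    ∀ (i : Nat) (hi : i < cols.length),
    (bLoop blocks cols pm)[i]'(by rw [length_bLoop]; exact hi) =
      if (i : Int) < pm then cols[i] ++ selColC blocks (i : Int) else cols[i] := by
  induction blocks with
  | nil =>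
    intro cols pm _ _ i hi
    simp [bLoop, selColC]
  | cons b bs ih =>
    intro cols pm h0 h1 i hi
    have hstep : bLoop (b :: bs) cols pm
        = bLoop bs (updCols cols b (min pm (b.length : Int))) (min pm (b.length : Int)) := rfl
    have h0' : (0 : Int) ≤ min pm (b.length : Int) :=
      le_min h0 (by exact_mod_cast Int.natCast_nonneg b.length)
    have h1' : min pm (b.length : Int) ≤ ((updCols cols b (min pm (b.length : Int))).length : Int) := by
      rw [length_updCols]; exact le_trans (min_le_left _ _) h1
    have hi' : i < (updCols cols b (min pm (b.length : Int))).length := by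
      rw [length_updCols]; exact hi
    have hmn : (min pm (b.length : Int)).toNat ≤ cols.length := by omega
    have hupd := getElem_updCols cols b (min pm (b.length : Int)).toNat hmn i hi
    rw [Int.toNat_of_nonneg h0'] at hupd
    simp only [hstep]
    rw [ih _ _ h0' h1' i hi']
    by_cases hlt : (i : Int) < min pm (b.length : Int)
    · have hib : i < b.length := by omega
      have hcol : selColC (b :: bs) (i : Int) = b[i] :: selColC bs (i : Int) := by
        simp [selColC, List.getElem?_eq_getElem hib]
      have hget : PySem.List.pyGetD b (i : Int) ' ' = b[i] := by
        simp [List.getD_eq_getElem?_getD, List.getElem?_eq_getElem hib]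
      rw [if_pos hlt, hupd, if_pos (by omega : i < (min pm (b.length : Int)).toNat),
        if_pos (by omega : (i : Int) < pm), hcol, hget]
      simp
    · by_cases hip : (i : Int) < pm
      · have hbi : b.length ≤ i := by omega
        have hcol : selColC (b :: bs) (i : Int) = [] := by
          simp [selColC, List.getElem?_eq_none hbi]
        rw [if_neg hlt, hupd, if_neg (by omega : ¬ i < (min pm (b.length : Int)).toNat),
          if_pos hip, hcol, List.append_nil]
      · rw [if_neg hlt, hupd, if_neg (by omega : ¬ i < (min pm (b.length : Int)).toNat),
          if_neg hip]

-- ===== VERDICT (by name: the statement is the Claim_ definition above) =====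
theorem select_symbols_spec : Claim_equal_select_symbols := by
  intro lst ln _
  unfold Spec_select_symbols select_symbols select_symbols_alt
  rw [PySem.List.foldl_append_singleton_eq_map, List.nil_append]
  by_cases hln : 0 ≤ ln
  · apply List.ext_getElem
    · simp [PySem.List.length_pyRange_one, length_bLoop]
    · intro i h1 h2
      have hi : i < (List.replicate ln.toNat ([] : List Char)).length := by
        simpa [length_bLoop] using h2
      have hil : (i : Int) < ln := by
        simp [List.length_replicate] at hi; omega
      simp only [List.getElem_map]
      congr 1
      rw [PySem.List.getElem_pyRange_one,
        getElem_bLoop _ _ _ hln (by simp) i hi, if_pos hil]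
      simp [selColA_eq_selColC]
  · have h0 : PySem.List.pyRange 0 ln 1 = [] := PySem.List.pyRange_one_eq_nil (by omega)
    have h2 : List.replicate ln.toNat ([] : List Char) = ([] : List (List Char)) := by
      have : ln.toNat = 0 := by omega
      rw [this]; rfl
    have h3 : bLoop (lst.map String.toList) [] ln = [] := by
      have := length_bLoop (lst.map String.toList) [] ln
      exact List.eq_nil_of_length_eq_zero (by simpa using this)
    simp [h0, h2, h3]
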